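-- pv_equiv track=rewrite | github.com/melody1-1/FFMAVP | Feature_Extract_1.py | checkFasta
-- ===== SOURCE A (Python) =====
-- def checkFasta(fastas):
-- 	status = True
-- 	lenList = set()
-- 	for i in fastas:
-- 		lenList.add(len(i[1]))
-- 	if len(lenList) == 1:
-- 		return True
-- 	else:
-- 		return False
-- ===== SOURCE B (Python) =====
-- def checkFasta(fastas):
-- 	it = iter(fastas)
-- 	try:
-- 		first = next(it)
-- 	except StopIteration:
-- 		return False
-- 	ref = len(first[1])
-- 	for i in it:
-- 		if len(i[1]) != ref:
-- 			return False
-- 	return True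
-- ===== Notes on version B (the rewrite author's own statement) =====
-- stated objective: simpler
-- what changed: B keeps one reference length from the first record and short-circuits on the first mismatch, instead of accumulating a set of all distinct lengths and testing its cardinality.
import Mathlib
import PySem

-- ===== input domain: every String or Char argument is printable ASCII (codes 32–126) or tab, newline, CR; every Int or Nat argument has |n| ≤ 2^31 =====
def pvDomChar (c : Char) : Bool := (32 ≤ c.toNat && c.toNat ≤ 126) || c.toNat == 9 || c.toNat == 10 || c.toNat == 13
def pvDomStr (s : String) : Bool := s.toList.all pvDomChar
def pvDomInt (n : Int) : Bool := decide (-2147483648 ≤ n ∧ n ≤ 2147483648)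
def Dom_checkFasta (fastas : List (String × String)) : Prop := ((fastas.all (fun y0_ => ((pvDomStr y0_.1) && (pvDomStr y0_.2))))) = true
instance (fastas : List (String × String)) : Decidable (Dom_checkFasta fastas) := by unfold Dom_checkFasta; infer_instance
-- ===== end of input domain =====

-- B keeps one reference length from the first record and short-circuits on the first mismatch,
-- instead of A's accumulation of a set of all distinct lengths tested for cardinality 1 (simpler).

-- ===== PORT A =====
def checkFasta (fastas : List (String × String)) : Bool :=
  let lenList : PySem.Set Int :=
    fastas.foldl (fun s i => PySem.Set.add s (PySem.Str.len i.2)) PySem.Set.empty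
  if PySem.Set.len lenList == 1 then true else false

-- ===== PORT B =====
-- the 'for i in it' loop of Source B, short-circuiting on the first mismatch
def checkFastaAltLoop (ref : Int) : List (String × String) → Bool
  | [] => true
  | i :: it => if PySem.Str.len i.2 != ref then false else checkFastaAltLoop ref it

def checkFasta_alt (fastas : List (String × String)) : Bool :=
  match fastas with
  | [] => false
  | first :: it => checkFastaAltLoop (PySem.Str.len first.2) it

-- ===== PRECONDITION & SPEC =====
def Spec_checkFasta (fastas : List (String × String)) (out : Bool) : Prop := out = checkFasta_alt fastas
instance (fastas : List (String × String)) (out : Bool) : Decidable (Spec_checkFasta fastas out) := by unfold Spec_checkFasta; infer_instance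

-- ===== CLAIM (what is proved, stated in full; the proofs are below) =====
def Claim_equal_checkFasta : Prop := ∀ (fastas : List (String × String)), Dom_checkFasta fastas → Spec_checkFasta fastas (checkFasta fastas)

-- ===== LEMMAS AND PROOFS =====

-- B's loop returns true iff every remaining length equals the reference
theorem altLoop_eq_all (ref : Int) (l : List (String × String)) :
    checkFastaAltLoop ref l = l.all (fun i => PySem.Str.len i.2 == ref) := by
  induction l with
  | nil => rfl
  | cons i it ih =>
      simp only [checkFastaAltLoop, List.all_cons, bne, ih]
      cases h : PySem.Str.len i.2 == ref <;> simp_all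

-- membership in A's accumulated set
theorem mem_foldl_add {α β : Type} [BEq α] [LawfulBEq α] (f : β → α) (l : List β) (s : PySem.Set α) (y : α) :
    y ∈ l.foldl (fun s i => PySem.Set.add s (f i)) s ↔ y ∈ s ∨ ∃ i ∈ l, f i = y := by
  induction l generalizing s with
  | nil => simp
  | cons i it ih =>
      simp only [List.foldl_cons, ih, PySem.Set.mem_add]
      constructor
      · rintro (⟨h | h⟩ | h)
        · exact Or.inl h
        · exact Or.inr ⟨i, by simp, h.symm⟩
        · rcases h with ⟨j, hj, hf⟩
          exact Or.inr ⟨j, by simp [hj], hf⟩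
      · rintro (h | ⟨j, hj, hf⟩)
        · exact Or.inl (Or.inl h)
        · rcases List.mem_cons.mp hj with rfl | hj
          · exact Or.inl (Or.inr hf.symm)
          · exact Or.inr ⟨j, hj, hf⟩

-- nodup preserved by A's fold
theorem nodup_foldl_add {α β : Type} [BEq α] [LawfulBEq α] (f : β → α) (l : List β) (s : PySem.Set α)
    (hs : s.Nodup) : (l.foldl (fun s i => PySem.Set.add s (f i)) s).Nodup := by
  induction l generalizing s with
  | nil => exact hs
  | cons i it ih => exact ih _ (PySem.Set.nodup_add _ (f i) hs)

-- a nodup list with exactly the members of {a} is [a]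
theorem nodup_eq_singleton {α : Type} (l : List α) (a : α) (hn : l.Nodup)
    (hmem : ∀ y, y ∈ l ↔ y = a) : l = [a] := by
  cases l with
  | nil => exact absurd ((hmem a).mpr rfl) (by simp)
  | cons b t =>
      have hb : b = a := (hmem b).mp (by simp)
      subst hb
      have ht : t = [] := by
        cases t with
        | nil => rfl
        | cons c u =>
            have hc : c = b := (hmem c).mp (by simp)
            simp [hc] at hn
      simp [ht]

theorem checkFasta_eq_alt (fastas : List (String × String)) :
    checkFasta fastas = checkFasta_alt fastas := by
  cases fastas with
  | nil => rfl
  | cons first it =>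
      simp only [checkFasta, checkFasta_alt, altLoop_eq_all]
      have hnodup := nodup_foldl_add (fun i => PySem.Str.len i.2) (first :: it)
        PySem.Set.empty (by simp [PySem.Set.empty])
      have hmem : ∀ y, y ∈ (first :: it).foldl
          (fun s i => PySem.Set.add s (PySem.Str.len i.2)) PySem.Set.empty ↔
          ∃ i ∈ first :: it, PySem.Str.len i.2 = y := by
        intro y
        rw [mem_foldl_add (fun i => PySem.Str.len i.2) (first :: it) PySem.Set.empty y]
        simp [PySem.Set.empty]
      by_cases hall : ∀ i ∈ it, PySem.Str.len i.2 = PySem.Str.len first.2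
      · have hone : (first :: it).foldl
            (fun s i => PySem.Set.add s (PySem.Str.len i.2)) PySem.Set.empty
            = [PySem.Str.len first.2] := by
          apply nodup_eq_singleton _ _ hnodup
          intro y
          rw [hmem y]
          constructor
          · rintro ⟨i, hi, rfl⟩
            rcases List.mem_cons.mp hi with rfl | hi
            · rfl
            · exact hall i hi
          · rintro rfl; exact ⟨first, by simp, rfl⟩
        rw [hone]
        have hlen1 : (PySem.Set.len [PySem.Str.len first.2] == 1) = true := by
          simp [PySem.Set.len]
        rw [hlen1]
        simp only [if_true]
        symm
        simp only [List.all_eq_true]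
        intro i hi
        simpa using hall i hi
      · push Not at hall
        rcases hall with ⟨j, hj, hne⟩
        have h1 : PySem.Str.len first.2 ∈ (first :: it).foldl
            (fun s i => PySem.Set.add s (PySem.Str.len i.2)) PySem.Set.empty :=
          (hmem _).mpr ⟨first, by simp, rfl⟩
        have h2 : PySem.Str.len j.2 ∈ (first :: it).foldl
            (fun s i => PySem.Set.add s (PySem.Str.len i.2)) PySem.Set.empty :=
          (hmem _).mpr ⟨j, by simp [hj], rfl⟩
        have hlen : ¬ ((first :: it).foldl
            (fun s i => PySem.Set.add s (PySem.Str.len i.2)) PySem.Set.empty).length = 1 := by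
          intro h
          rcases List.length_eq_one_iff.mp h with ⟨a, ha⟩
          rw [ha] at h1 h2
          simp at h1 h2
          exact hne (h2.trans h1.symm)
        have hne1 : (PySem.Set.len ((first :: it).foldl
            (fun s i => PySem.Set.add s (PySem.Str.len i.2)) PySem.Set.empty) == 1) = false := by
          simp only [PySem.Set.len, beq_eq_false_iff_ne, ne_eq]
          intro h
          exact hlen (by exact_mod_cast h)
        rw [hne1]
        simp only [Bool.false_eq_true, if_false]
        symm
        rw [List.all_eq_false]
        exact ⟨j, hj, by simpa using hne⟩

-- ===== VERDICT (by name: the statement is the Claim_ definition above) =====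
theorem checkFasta_spec : Claim_equal_checkFasta := by
  intro fastas _
  exact checkFasta_eq_alt fastas
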